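-- pv_equiv track=rewrite | github.com/aronvis/Python-Projects | ShrinkableWord.py | is_shrinkable
-- ===== SOURCE A (Python) =====
-- def is_shrinkable(word, lexicon):
--     if word not in lexicon:
--         return False
--     if len(word) == 1:
--         return True
--     for letter_index in range(len(word)):
--         shrunken_word = word[:letter_index] + word[letter_index+1:]
--         if shrunken_word in lexicon and is_shrinkable(shrunken_word, lexicon):
--             return True
--     return False
-- ===== SOURCE B (Python) =====
-- def is_shrinkable(word, lexicon):
--     # Iterative BFS over generations of one-letter deletions; each distinct
--     # word is examined at most once per level.
--     lex = set(lexicon)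
--     if word not in lex:
--         return False
--     frontier = {word}
--     while frontier:
--         if any(len(w) == 1 for w in frontier):
--             return True
--         frontier = {w[:i] + w[i+1:] for w in frontier for i in range(len(w))} & lex
--     return False
-- ===== Notes on version B (the rewrite author's own statement) =====
-- stated objective: alternative
-- what changed: Replaced A's top-down recursion over deletion orders by an iterative level-by-level BFS that keeps each generation of shrunken words as a set intersected with the lexicon, so each candidate word is examined at most once per level; it trades recursion for set operations.
import Mathlib
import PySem

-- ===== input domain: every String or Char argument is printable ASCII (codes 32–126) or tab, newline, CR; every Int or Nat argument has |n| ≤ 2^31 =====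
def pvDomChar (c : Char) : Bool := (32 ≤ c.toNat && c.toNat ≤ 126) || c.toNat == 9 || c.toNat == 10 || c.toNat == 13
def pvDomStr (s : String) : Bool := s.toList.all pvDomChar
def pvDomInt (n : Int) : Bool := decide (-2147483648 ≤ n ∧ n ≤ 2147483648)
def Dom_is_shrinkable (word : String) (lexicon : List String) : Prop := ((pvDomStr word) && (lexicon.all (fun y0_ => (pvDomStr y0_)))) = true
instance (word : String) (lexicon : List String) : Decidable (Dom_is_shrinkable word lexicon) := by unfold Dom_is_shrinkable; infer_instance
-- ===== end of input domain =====

-- B is an iterative level-by-level BFS over sets of one-letter deletions instead of A's top-down recursion (alternative algorithm, same return value).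
-- Strings are handled on the List Char side (PySem convention); string slicing word[:i] + word[i+1:] is the exact slice semantics.

-- ===== PORT A =====
-- cited by the termination proof of shrinkA (a lemma the port needs may stay above it)
theorem pvShrunkLen (w : List Char) (i : Int) (h0 : 0 ≤ i) (h1 : i < (w.length : Int)) :
    (PySem.List.slice w none (some i) ++ PySem.List.slice w (some (i+1)) none).length = w.length - 1 := by
  rw [PySem.List.slice_to w h0, PySem.List.slice_from w (show (0:Int) ≤ i+1 by omega)]
  simp only [List.length_append, List.length_take, List.length_drop]
  omega

-- the recursion of A, on code-point lists
def shrinkA (lex : List (List Char)) (w : List Char) : Bool :=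
  if w ∈ lex then
    if w.length == 1 then true
    else
      (PySem.List.pyRange 0 (w.length : Int) 1).attach.any (fun p =>
        let sh := PySem.List.slice w none (some p.1) ++ PySem.List.slice w (some (p.1+1)) none
        decide (sh ∈ lex) && shrinkA lex sh)
  else false
termination_by w.length
decreasing_by
  have hm := (PySem.List.mem_pyRange_one).1 p.2
  have := pvShrunkLen w p.1 hm.1 (by simpa using hm.2)
  simp only [this]
  have : 0 < w.length := by omega
  omega

def is_shrinkable (word : String) (lexicon : List String) : Bool :=
  shrinkA (lexicon.map String.toList) word.toList

-- ===== PORT B =====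
-- {w[:i] + w[i+1:] for i in range(len(w))} contribution of one frontier word
def shrinksOf (w : List Char) : List (List Char) :=
  (PySem.List.pyRange 0 (w.length : Int) 1).map (fun i =>
    PySem.List.slice w none (some i) ++ PySem.List.slice w (some (i+1)) none)

-- the 'while frontier:' loop; fuel is only a totality guard (word.length + 1 always suffices)
def bfsB (lex : PySem.Set (List Char)) : Nat → PySem.Set (List Char) → Bool
  | _, [] => false
  | 0, _ :: _ => false
  | n+1, f :: fs =>
      if (f :: fs).any (fun w => w.length == 1) then true
      else bfsB lex n
        (PySem.Set.inter (PySem.Set.ofList ((f :: fs).flatMap shrinksOf)) lex)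

def is_shrinkable_alt (word : String) (lexicon : List String) : Bool :=
  let lex : PySem.Set (List Char) := PySem.Set.ofList (lexicon.map String.toList)
  let w := word.toList
  if w ∈ lex then bfsB lex (w.length + 1) (PySem.Set.ofList [w])
  else false

-- ===== PRECONDITION & SPEC =====
def Spec_is_shrinkable (word : String) (lexicon : List String) (out : Bool) : Prop := out = is_shrinkable_alt word lexicon
instance (word : String) (lexicon : List String) (out : Bool) : Decidable (Spec_is_shrinkable word lexicon out) := by unfold Spec_is_shrinkable; infer_instance

-- ===== CLAIM (what is proved, stated in full; the proofs are below) =====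
def Claim_equal_is_shrinkable : Prop := ∀ (word : String) (lexicon : List String), Dom_is_shrinkable word lexicon → Spec_is_shrinkable word lexicon (is_shrinkable word lexicon)

-- ===== LEMMAS AND PROOFS =====

theorem mem_shrinksOf {w y : List Char} :
    y ∈ shrinksOf w ↔ ∃ i : Int, 0 ≤ i ∧ i < (w.length : Int) ∧
      y = PySem.List.slice w none (some i) ++ PySem.List.slice w (some (i+1)) none := by
  unfold shrinksOf
  simp only [List.mem_map, PySem.List.mem_pyRange_one]
  constructor
  · rintro ⟨i, ⟨h0, h1⟩, rfl⟩; exact ⟨i, h0, h1, rfl⟩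
  · rintro ⟨i, h0, h1, rfl⟩; exact ⟨i, ⟨h0, h1⟩, rfl⟩

theorem length_of_mem_shrinksOf {w y : List Char} (h : y ∈ shrinksOf w) :
    y.length = w.length - 1 ∧ 0 < w.length := by
  rcases mem_shrinksOf.1 h with ⟨i, h0, h1, rfl⟩
  exact ⟨pvShrunkLen w i h0 h1, by omega⟩

-- shrinkA on a word of length 0 is false
theorem shrinkA_nil (lex : List (List Char)) (w : List Char) (hw : w.length = 0) :
    shrinkA lex w = false := by
  have hnil : w = [] := List.length_eq_zero_iff.1 hw
  subst hnil
  rw [shrinkA]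
  simp [PySem.List.pyRange_one_eq_nil]

-- unfolding of shrinkA in the long-word case
theorem shrinkA_long (lex : List (List Char)) (w : List Char) (hmem : w ∈ lex)
    (hlen : w.length ≠ 1) :
    shrinkA lex w =
      (shrinksOf w).any (fun sh => decide (sh ∈ lex) && shrinkA lex sh) := by
  rw [shrinkA]
  simp only [hmem, if_true, hlen, beq_iff_eq, if_false]
  unfold shrinksOf
  rw [Bool.eq_iff_iff]
  simp only [List.any_eq_true, List.mem_attach, true_and, Subtype.exists, List.mem_map]
  constructor
  · rintro ⟨i, hi, h⟩; exact ⟨_, ⟨i, hi, rfl⟩, h⟩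
  · rintro ⟨x, ⟨i, hi, rfl⟩, h⟩; exact ⟨i, hi, h⟩

-- main invariant: BFS from frontier F computes "some word of F is shrinkable",
-- provided F ⊆ lexicon (as membership) and every word of F fits in the fuel.
theorem bfsB_correct (lexL : List (List Char)) (lexS : PySem.Set (List Char))
    (hmemS : ∀ x, x ∈ lexS ↔ x ∈ lexL) :
    ∀ (fuel : Nat) (F : PySem.Set (List Char)),
      (∀ w ∈ F, w.length ≤ fuel) → (∀ w ∈ F, w ∈ lexL) →
      bfsB lexS fuel F = F.any (fun w => shrinkA lexL w) := by
  intro fuel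
  induction fuel with
  | zero =>
    intro F hlen hsub
    rcases F with _ | ⟨f, fs⟩
    · simp [bfsB]
    · rw [bfsB]
      symm
      rw [List.any_eq_false]
      intro w hw
      simp [shrinkA_nil lexL w (by have := hlen w hw; omega)]
  | succ n ih =>
    intro F hlen hsub
    rcases F with _ | ⟨f, fs⟩
    · simp [bfsB]
    · rw [bfsB]
      by_cases hone : (f :: fs).any (fun w => w.length == 1) = true
      · rw [if_pos hone]
        rcases List.any_eq_true.1 hone with ⟨w, hw, hl⟩
        symm
        rw [List.any_eq_true]
        refine ⟨w, hw, ?_⟩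
        rw [shrinkA]
        simp [hsub w hw, hl]
      · rw [if_neg hone]
        have hone' : ∀ w ∈ (f :: fs), w.length ≠ 1 := by
          intro w hw h1
          exact hone (List.any_eq_true.2 ⟨w, hw, by simp [h1]⟩)
        set next := PySem.Set.inter (PySem.Set.ofList ((f :: fs).flatMap shrinksOf)) lexS with hnext
        have hmem_next : ∀ y, y ∈ next ↔ ((∃ w ∈ (f :: fs), y ∈ shrinksOf w) ∧ y ∈ lexL) := by
          intro y
          rw [hnext, PySem.Set.mem_inter _ _ y, PySem.Set.mem_ofList _ y, List.mem_flatMap, hmemS]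
        rw [ih next ?_ ?_]
        · -- next.any shrinkA = (f::fs).any shrinkA
          rcases hb : (f :: fs).any (fun w => shrinkA lexL w) with _ | _
          · -- both false
            rw [List.any_eq_false] at hb ⊢
            intro y hy
            rcases (hmem_next y).1 hy with ⟨⟨w, hw, hyw⟩, hylex⟩
            -- if shrinkA y were true, shrinkA w would be true
            intro hyt
            have : shrinkA lexL w = true := by
              rw [shrinkA_long lexL w (hsub w hw) (hone' w hw), List.any_eq_true]
              exact ⟨y, hyw, by simp [hylex, hyt]⟩
            exact (hb w hw) this
          · -- both true
            rcases List.any_eq_true.1 hb with ⟨w, hw, hws⟩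
            rw [shrinkA_long lexL w (hsub w hw) (hone' w hw), List.any_eq_true] at hws
            rcases hws with ⟨y, hyw, hy⟩
            simp only [Bool.and_eq_true, decide_eq_true_eq] at hy
            rw [List.any_eq_true]
            exact ⟨y, (hmem_next y).2 ⟨⟨w, hw, hyw⟩, hy.1⟩, hy.2⟩
        · intro y hy
          rcases (hmem_next y).1 hy with ⟨⟨w, hw, hyw⟩, _⟩
          have := length_of_mem_shrinksOf hyw
          have := hlen w hw
          omega
        · intro y hy
          exact ((hmem_next y).1 hy).2

-- ===== VERDICT (by name: the statement is the Claim_ definition above) =====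
theorem is_shrinkable_spec : Claim_equal_is_shrinkable := by
  intro word lexicon _
  unfold Spec_is_shrinkable is_shrinkable is_shrinkable_alt
  set lexL := lexicon.map String.toList with hL
  set lexS : PySem.Set (List Char) := PySem.Set.ofList lexL with hS
  set w := word.toList with hw
  have hmemS : ∀ x, x ∈ lexS ↔ x ∈ lexL := fun x => PySem.Set.mem_ofList lexL x
  by_cases hm : w ∈ lexS
  · rw [if_pos hm]
    have hwl : w ∈ lexL := (hmemS w).1 hm
    have hsingle : PySem.Set.ofList [w] = [w] := by
      apply PySem.Set.ofList_eq_self_of_nodup; simp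
    rw [hsingle]
    rw [bfsB_correct lexL lexS hmemS (w.length + 1) [w]
      (by intro y hy; simp at hy; subst hy; omega)
      (by intro y hy; simp at hy; subst hy; exact hwl)]
    simp
  · rw [if_neg hm]
    rw [shrinkA, if_neg (fun h => hm ((hmemS w).2 h))]
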